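-- pv_equiv track=rewrite | github.com/vteran93/mission_control | spec_intake/flexible_inputs.py | _estimate_for_ticket
-- ===== SOURCE A (Python) =====
-- def _estimate_for_ticket(title: str, nested_items: list[str]) -> str:
--     complexity_score = len(nested_items)
--     lowered = title.lower()
--     if any(token in lowered for token in ("arquitectura", "foundation", "infraestructura", "migracion")):
--         complexity_score += 2
--     if complexity_score >= 8:
--         return "16 h"
--     if complexity_score >= 4:
--         return "12 h"
--     if complexity_score >= 2:
--         return "8 h"
--     return "4 h"
-- ===== SOURCE B (Python) =====
-- def _estimate_for_ticket(title: str, nested_items: list[str]) -> str: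
--     lowered = title.lower()
--     score = len(nested_items) + 2 * any(
--         token in lowered
--         for token in ("arquitectura", "foundation", "infraestructura", "migracion")
--     )
--     # The cutoffs 2, 4, 8 are consecutive powers of two, so the bracket a score
--     # falls into is exactly its bit length (clamped to [1, 4]); hours = 4 * bracket.
--     return f"{4 * min(4, max(1, score.bit_length()))} h"
-- ===== Notes on version B (the rewrite author's own statement) =====
-- stated objective: alternative
-- what changed: The >=8/>=4/>=2 early-return ladder and its string constants are gone: since the cutoffs are consecutive powers of two, B computes the bracket arithmetically as the score's bit length clamped to [1,4] and formats 4*bracket as the hour string.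
import Mathlib
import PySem

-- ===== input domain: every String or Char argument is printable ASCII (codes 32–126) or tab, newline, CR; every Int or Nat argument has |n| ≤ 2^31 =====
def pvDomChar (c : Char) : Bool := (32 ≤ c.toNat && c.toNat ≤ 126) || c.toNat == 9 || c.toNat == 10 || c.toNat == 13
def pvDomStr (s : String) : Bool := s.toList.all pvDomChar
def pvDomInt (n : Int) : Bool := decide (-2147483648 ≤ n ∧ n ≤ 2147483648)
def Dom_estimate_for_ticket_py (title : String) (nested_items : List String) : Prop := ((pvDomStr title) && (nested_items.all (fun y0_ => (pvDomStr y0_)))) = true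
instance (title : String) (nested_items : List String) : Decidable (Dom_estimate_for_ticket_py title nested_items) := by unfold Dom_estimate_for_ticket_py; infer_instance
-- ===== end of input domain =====

-- B replaces A's threshold ladder and string constants by a closed-form computation:
-- the cutoffs 2,4,8 are powers of two, so hours = 4 * (bit length of the score, clamped to [1,4]) (alternative; same cost).

-- ===== PORT A =====
def estimate_for_ticket_py (title : String) (nested_items : List String) : String :=
  let complexity_score : Int := nested_items.length
  let lowered := PySem.Str.lower title
  let complexity_score :=
    if ["arquitectura", "foundation", "infraestructura", "migracion"].any
        (fun token => PySem.Str.isIn token lowered)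
    then complexity_score + 2 else complexity_score
  if complexity_score ≥ 8 then "16 h"
  else if complexity_score ≥ 4 then "12 h"
  else if complexity_score ≥ 2 then "8 h"
  else "4 h"

-- ===== PORT B =====
-- Python int.bit_length for the nonnegative ints B applies it to (exact on n ≥ 0)
def pvBitLength (n : Int) : Int :=
  if n ≤ 0 then 0 else (Nat.log2 n.toNat : Int) + 1

def estimate_for_ticket_py_alt (title : String) (nested_items : List String) : String :=
  let lowered := PySem.Str.lower title
  let score : Int := nested_items.length +
    2 * (if ["arquitectura", "foundation", "infraestructura", "migracion"].any
            (fun token => PySem.Str.isIn token lowered)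
         then 1 else 0)
  PySem.Int.toStr (4 * min 4 (max 1 (pvBitLength score))) ++ " h"

-- ===== PRECONDITION & SPEC =====
def Spec_estimate_for_ticket_py (title : String) (nested_items : List String) (out : String) : Prop := out = estimate_for_ticket_py_alt title nested_items
instance (title : String) (nested_items : List String) (out : String) : Decidable (Spec_estimate_for_ticket_py title nested_items out) := by unfold Spec_estimate_for_ticket_py; infer_instance

-- ===== CLAIM =====
def Claim_equal_estimate_for_ticket_py : Prop := ∀ (title : String) (nested_items : List String), Dom_estimate_for_ticket_py title nested_items → Spec_estimate_for_ticket_py title nested_items (estimate_for_ticket_py title nested_items)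

-- ===== LEMMAS AND PROOFS =====
theorem pv_closed_form (n : Nat) :
    (if (n : Int) ≥ 8 then "16 h" else if (n : Int) ≥ 4 then "12 h"
     else if (n : Int) ≥ 2 then "8 h" else "4 h")
      = PySem.Int.toStr (4 * min 4 (max 1 (pvBitLength (n : Int)))) ++ " h" := by
  have hbl : pvBitLength (n : Int) = if n = 0 then 0 else (Nat.log2 n : Int) + 1 := by
    unfold pvBitLength
    rcases Nat.eq_zero_or_pos n with h | h
    · simp [h]
    · rw [if_neg (by exact_mod_cast by omega : ¬ ((n : Int) ≤ 0)), if_neg (by omega : ¬ n = 0)]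
      simp [Int.toNat_natCast]
  by_cases h8 : 8 ≤ n
  · have hne : n ≠ 0 := by omega
    have h3 : 3 ≤ Nat.log2 n := (Nat.le_log2 hne).mpr (by omega)
    have hv : 4 * min 4 (max 1 (pvBitLength (n : Int))) = 16 := by
      rw [hbl]; rw [if_neg hne]; omega
    rw [hv, if_pos (by exact_mod_cast h8)]
    decide
  · by_cases h4 : 4 ≤ n
    · have hne : n ≠ 0 := by omega
      have hlo : 2 ≤ Nat.log2 n := (Nat.le_log2 hne).mpr (by omega)
      have hhi : Nat.log2 n < 3 := (Nat.log2_lt hne).mpr (by omega)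
      have hv : 4 * min 4 (max 1 (pvBitLength (n : Int))) = 12 := by
        rw [hbl]; rw [if_neg hne]; omega
      rw [hv, if_neg (by exact_mod_cast by omega : ¬ ((n : Int) ≥ 8)),
        if_pos (by exact_mod_cast h4)]
      decide
    · by_cases h2 : 2 ≤ n
      · have hne : n ≠ 0 := by omega
        have hlo : 1 ≤ Nat.log2 n := (Nat.le_log2 hne).mpr (by omega)
        have hhi : Nat.log2 n < 2 := (Nat.log2_lt hne).mpr (by omega)
        have hv : 4 * min 4 (max 1 (pvBitLength (n : Int))) = 8 := by
          rw [hbl]; rw [if_neg hne]; omega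
        rw [hv, if_neg (by exact_mod_cast by omega : ¬ ((n : Int) ≥ 8)),
          if_neg (by exact_mod_cast by omega : ¬ ((n : Int) ≥ 4)),
          if_pos (by exact_mod_cast h2)]
        decide
      · have hv : 4 * min 4 (max 1 (pvBitLength (n : Int))) = 4 := by
          rw [hbl]
          rcases (by omega : n = 0 ∨ n = 1) with h | h <;> subst h <;> decide
        rw [hv, if_neg (by exact_mod_cast by omega : ¬ ((n : Int) ≥ 8)),
          if_neg (by exact_mod_cast by omega : ¬ ((n : Int) ≥ 4)),
          if_neg (by exact_mod_cast by omega : ¬ ((n : Int) ≥ 2))]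
        decide

-- ===== VERDICT =====
theorem estimate_for_ticket_py_spec : Claim_equal_estimate_for_ticket_py := by
  intro title nested_items _
  unfold Spec_estimate_for_ticket_py estimate_for_ticket_py estimate_for_ticket_py_alt
  by_cases h : ["arquitectura", "foundation", "infraestructura", "migracion"].any
      (fun token => PySem.Str.isIn token (PySem.Str.lower title)) = true
  · simp only [h, if_true]
    have := pv_closed_form (nested_items.length + 2)
    push_cast at this ⊢
    convert this using 3
  · simp only [h]
    have := pv_closed_form nested_items.length
    push_cast at this ⊢
    convert this using 3
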